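-- pv_equiv track=rewrite | github.com/hibaa03/brainbud | app.py | process_practice_questions
-- ===== SOURCE A (Python) =====
-- def process_practice_questions(questions):
--     grouped_questions = []
--     current_question = []
--
--     for line in questions:
--         if line.strip():
--             current_question.append(line)
--         else:
--             if current_question:
--                 grouped_questions.append("\n".join(current_question))
--                 current_question = []
--     if current_question:  # Add the last question if there's no blank line after it
--         grouped_questions.append("\n".join(current_question))
--
--     return grouped_questions
-- ===== SOURCE B (Python) =====
-- def process_practice_questions(questions):
--     result = []
--     i, n = 0, len(questions)
--     while i < n:
--         if questions[i].strip():
--             j = i + 1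
--             while j < n and questions[j].strip():
--                 j += 1
--             result.append("\n".join(questions[i:j]))
--             i = j
--         else:
--             i += 1
--     return result
-- ===== Notes on version B (the rewrite author's own statement) =====
-- stated objective: alternative
-- what changed: Replaced the accumulator state machine with trailing flush by an index-based two-pointer scan that finds the end of each maximal nonblank run with an inner while loop and joins the slice directly.
import Mathlib
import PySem

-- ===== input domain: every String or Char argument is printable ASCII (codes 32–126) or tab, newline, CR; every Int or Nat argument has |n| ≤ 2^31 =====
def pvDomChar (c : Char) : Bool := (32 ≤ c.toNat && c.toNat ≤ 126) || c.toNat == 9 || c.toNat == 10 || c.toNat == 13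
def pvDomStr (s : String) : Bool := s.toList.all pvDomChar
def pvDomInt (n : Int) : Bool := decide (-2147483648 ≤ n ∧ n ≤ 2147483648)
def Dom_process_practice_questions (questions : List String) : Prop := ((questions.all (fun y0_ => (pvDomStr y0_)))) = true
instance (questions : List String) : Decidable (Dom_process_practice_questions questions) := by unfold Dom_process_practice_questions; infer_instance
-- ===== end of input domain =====

-- B replaces A's accumulator state machine (with trailing flush) by an index-based
-- two-pointer scan that splits off each maximal nonblank run; same cost (alternative).

-- ===== PORT A =====
-- fold step: one iteration of A's for-loop over state (grouped_questions, current_question)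
def ppqStep (st : List String × List String) (line : String) : List String × List String :=
  if PySem.Str.strip line ≠ "" then (st.1, st.2 ++ [line])
  else if st.2 ≠ [] then (st.1 ++ [PySem.Str.join "\n" st.2], [])
  else st

def process_practice_questions (questions : List String) : List String :=
  let st := questions.foldl ppqStep ([], [])
  if st.2 ≠ [] then st.1 ++ [PySem.Str.join "\n" st.2] else st.1

-- ===== PORT B =====
-- inner while loop: advance j while j < n and questions[j].strip()
def ppqRunEnd (qs : List String) (n : Nat) (j : Nat) : Nat :=
  if j < n ∧ PySem.Str.strip (qs.getD j "") ≠ "" then ppqRunEnd qs n (j + 1) else j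
  termination_by n - j
  decreasing_by omega

theorem le_ppqRunEnd (qs : List String) (n j : Nat) : j ≤ ppqRunEnd qs n j := by
  unfold ppqRunEnd
  split
  · exact Nat.le_of_succ_le (le_ppqRunEnd qs n (j + 1))
  · exact Nat.le_refl j
  termination_by n - j
  decreasing_by omega

-- outer while loop over (result, i)
def ppqAltLoop (qs : List String) (n : Nat) (res : List String) (i : Nat) : List String :=
  if h : i < n then
    if PySem.Str.strip (qs.getD i "") ≠ "" then
      let j := ppqRunEnd qs n (i + 1)
      ppqAltLoop qs n
        (res ++ [PySem.Str.join "\n" (PySem.List.slice qs (some (i : Int)) (some (j : Int)))]) j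
    else ppqAltLoop qs n res (i + 1)
  else res
  termination_by n - i
  decreasing_by
  · have := le_ppqRunEnd qs n (i + 1); omega
  · omega

def process_practice_questions_alt (questions : List String) : List String :=
  ppqAltLoop questions questions.length [] 0

-- ===== PRECONDITION & SPEC =====
def Spec_process_practice_questions (questions : List String) (out : List String) : Prop := out = process_practice_questions_alt questions
instance (questions : List String) (out : List String) : Decidable (Spec_process_practice_questions questions out) := by unfold Spec_process_practice_questions; infer_instance

-- ===== CLAIM (what is proved, stated in full; the proofs are below) =====
def Claim_equal_process_practice_questions : Prop := ∀ (questions : List String), Dom_process_practice_questions questions → Spec_process_practice_questions questions (process_practice_questions questions)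

-- ===== LEMMAS AND PROOFS =====

-- proof-side helper: (maximal leading nonblank run, remainder) of a list
def ppqSplitRun : List String → List String × List String
  | [] => ([], [])
  | l :: rest =>
    if PySem.Str.strip l ≠ "" then
      let p := ppqSplitRun rest
      (l :: p.1, p.2)
    else ([], l :: rest)

-- proof-side characterisation: result given pending current question `cur`
def ppqG (cur : List String) : List String → List String
  | [] => if cur ≠ [] then [PySem.Str.join "\n" cur] else []
  | l :: rest =>
    if PySem.Str.strip l ≠ "" then ppqG (cur ++ [l]) rest
    else if cur ≠ [] then PySem.Str.join "\n" cur :: ppqG [] rest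
    else ppqG [] rest

theorem ppqA_eq_g (qs : List String) : ∀ acc cur,
    (let st := qs.foldl ppqStep (acc, cur);
     if st.2 ≠ [] then st.1 ++ [PySem.Str.join "\n" st.2] else st.1)
    = acc ++ ppqG cur qs := by
  induction qs with
  | nil =>
    intro acc cur
    simp only [List.foldl_nil, ppqG]
    split <;> simp_all
  | cons l rest ih =>
    intro acc cur
    simp only [List.foldl_cons, ppqStep, ppqG]
    by_cases hl : PySem.Str.strip l ≠ ""
    · rw [if_pos hl, if_pos hl]
      exact ih acc (cur ++ [l])
    · rw [if_neg hl, if_neg hl]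
      by_cases hc : cur ≠ []
      · rw [if_pos hc, if_pos hc, ih (acc ++ [PySem.Str.join "\n" cur]) []]
        simp
      · rw [if_neg hc, if_neg hc]
        have hc' : cur = [] := not_not.mp hc
        subst hc'
        exact ih acc []

theorem ppqG_pending (qs : List String) : ∀ cur, cur ≠ [] →
    ppqG cur qs
    = PySem.Str.join "\n" (cur ++ (ppqSplitRun qs).1) :: ppqG [] (ppqSplitRun qs).2 := by
  induction qs with
  | nil =>
    intro cur h
    simp only [ppqG, ppqSplitRun, if_pos h]
    simp
  | cons l rest ih =>
    intro cur h
    simp only [ppqG, ppqSplitRun]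
    by_cases hl : PySem.Str.strip l ≠ ""
    · rw [if_pos hl, if_pos hl, ih (cur ++ [l]) (by simp)]
      simp
    · rw [if_neg hl, if_neg hl, if_pos h]
      simp only [ppqG]
      rw [if_neg hl]
      simp

-- the inner while loop computes exactly the split of the suffix qs.drop i
theorem ppqRunEnd_splitRun (qs : List String) : ∀ (k i : Nat), qs.length - i ≤ k →
    ppqRunEnd qs qs.length i = i + (ppqSplitRun (qs.drop i)).1.length ∧
    qs.drop (ppqRunEnd qs qs.length i) = (ppqSplitRun (qs.drop i)).2 ∧
    (qs.drop i).take (ppqRunEnd qs qs.length i - i) = (ppqSplitRun (qs.drop i)).1 := by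
  intro k
  induction k with
  | zero =>
    intro i h
    have hin : qs.length ≤ i := by omega
    have hd : qs.drop i = [] := List.drop_eq_nil_of_le hin
    rw [ppqRunEnd]
    rw [if_neg (by omega)]
    simp [hd, ppqSplitRun]
  | succ k ih =>
    intro i h
    by_cases hin : i < qs.length
    · have hd : qs.drop i = qs[i] :: qs.drop (i + 1) := List.drop_eq_getElem_cons hin
      have hgd : qs.getD i "" = qs[i] := List.getD_eq_getElem qs "" hin
      rw [ppqRunEnd]
      by_cases hl : PySem.Str.strip qs[i] ≠ ""
      · rw [if_pos ⟨hin, by rw [hgd]; exact hl⟩]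
        obtain ⟨h1, h2, h3⟩ := ih (i + 1) (by omega)
        refine ⟨?_, ?_, ?_⟩
        · rw [h1, hd]
          simp only [ppqSplitRun]
          rw [if_pos hl]
          simp; omega
        · rw [h2, hd]
          simp only [ppqSplitRun]
          rw [if_pos hl]
        · rw [hd]
          simp only [ppqSplitRun]
          rw [if_pos hl]
          have hge : i + 1 ≤ ppqRunEnd qs qs.length (i + 1) := le_ppqRunEnd qs qs.length (i + 1)
          have : ppqRunEnd qs qs.length (i + 1) - i
              = (ppqRunEnd qs qs.length (i + 1) - (i + 1)) + 1 := by omega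
          rw [this, List.take_succ_cons, h3]
      · rw [if_neg (by rw [hgd]; tauto)]
        rw [hd]
        simp only [ppqSplitRun]
        rw [if_neg hl]
        simp
    · have hd : qs.drop i = [] := List.drop_eq_nil_of_le (by omega)
      rw [ppqRunEnd, if_neg (by omega)]
      simp [hd, ppqSplitRun]

-- the outer loop computes ppqG [] on the remaining suffix
theorem ppqLoop_eq_g (qs : List String) : ∀ (k : Nat) (res : List String) (i : Nat),
    qs.length - i ≤ k →
    ppqAltLoop qs qs.length res i = res ++ ppqG [] (qs.drop i) := by
  intro k
  induction k with
  | zero =>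
    intro res i h
    have hd : qs.drop i = [] := List.drop_eq_nil_of_le (by omega)
    rw [ppqAltLoop, dif_neg (by omega)]
    simp [hd, ppqG]
  | succ k ih =>
    intro res i h
    by_cases hin : i < qs.length
    · have hd : qs.drop i = qs[i] :: qs.drop (i + 1) := List.drop_eq_getElem_cons hin
      have hgd : qs.getD i "" = qs[i] := List.getD_eq_getElem qs "" hin
      rw [ppqAltLoop, dif_pos hin]
      by_cases hl : PySem.Str.strip qs[i] ≠ ""
      · rw [if_pos (by rw [hgd]; exact hl)]
        obtain ⟨h1, h2, h3⟩ := ppqRunEnd_splitRun qs (qs.length - (i + 1)) (i + 1) (le_refl _)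
        have hge : i + 1 ≤ ppqRunEnd qs qs.length (i + 1) := le_ppqRunEnd qs qs.length (i + 1)
        rw [ih _ _ (by omega)]
        rw [hd, ppqG, if_pos hl, ppqG_pending _ ([] ++ [qs[i]]) (by simp)]
        rw [List.append_assoc]
        congr 1
        rw [← h2]
        congr 2
        -- the Python slice qs[i:j] is [qs[i]] ++ run of the tail
        rw [PySem.List.slice_natCast]
        have hsub : ppqRunEnd qs qs.length (i + 1) - i
            = (ppqRunEnd qs qs.length (i + 1) - (i + 1)) + 1 := by omega
        rw [hd, hsub, List.take_succ_cons, h3]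
        simp
      · -- blank line: B skips it, A's state machine flushes nothing (cur = [])
        rw [if_neg (by rw [hgd]; tauto)]
        rw [ih res (i + 1) (by omega), hd, ppqG, if_neg hl]
        simp
    · have hd : qs.drop i = [] := List.drop_eq_nil_of_le (by omega)
      rw [ppqAltLoop, dif_neg (by omega)]
      simp [hd, ppqG]

-- ===== VERDICT (by name: the statement is the Claim_ definition above) =====
theorem process_practice_questions_spec : Claim_equal_process_practice_questions := by
  intro questions _
  unfold Spec_process_practice_questions process_practice_questions process_practice_questions_alt
  rw [ppqA_eq_g questions [] []]
  rw [ppqLoop_eq_g questions questions.length [] 0 (by omega)]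
  simp
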